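-- pv_equiv track=rewrite | github.com/kavia-common/tmfmapperv1-5116-5210 | FlaskTMFTranslationMiddleware/app/services/catalogue.py | _crud_from_paths
-- ===== SOURCE A (Python) =====
-- from typing import Any, Dict, List
--
-- def _crud_from_paths(resource_name: str, paths: Dict[str, Any]) -> Dict[str, bool]:
--     """Infer CRUD capabilities from OpenAPI paths by common REST naming."""
--     res = resource_name
--     plural = f"/{res.lower()}s"
--     singular = f"/{res.lower()}"
--     caps = {"canCreate": False, "canRead": False, "canUpdate": False, "canDelete": False}
--     for p, path_item in (paths or {}).items():
--         # naive matching on endpoints that contain resource name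
--         if res.lower() in p.lower():
--             methods = {m.lower() for m in path_item.keys()}
--             if "get" in methods:
--                 caps["canRead"] = True
--             if "post" in methods:
--                 caps["canCreate"] = True
--             if "put" in methods or "patch" in methods:
--                 caps["canUpdate"] = True
--             if "delete" in methods:
--                 caps["canDelete"] = True
--         # some naive pluralization checks
--         if p.lower().startswith(plural):
--             methods = {m.lower() for m in path_item.keys()}
--             if "get" in methods:
--                 caps["canRead"] = True
--             if "post" in methods:
--                 caps["canCreate"] = True
--         if p.lower().startswith(singular + "/") or p.lower().startswith(plural + "/"):
--             methods = {m.lower() for m in path_item.keys()}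
--             if "get" in methods:
--                 caps["canRead"] = True
--             if "put" in methods or "patch" in methods:
--                 caps["canUpdate"] = True
--             if "delete" in methods:
--                 caps["canDelete"] = True
--     return caps
-- ===== SOURCE B (Python) =====
-- def _crud_from_paths(resource_name, paths):
--     low = resource_name.lower()
--     # one flat union set of every method on a matching path; the two prefix
--     # blocks of the original are subsumed by the substring test
--     methods = {m.lower()
--                for p, item in (paths or {}).items()
--                if low in p.lower()
--                for m in item.keys()}
--     return {
--         "canCreate": "post" in methods,
--         "canRead": "get" in methods,
--         "canUpdate": "put" in methods or "patch" in methods,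
--         "canDelete": "delete" in methods,
--     }
-- ===== Notes on version B (the rewrite author's own statement) =====
-- stated objective: simpler
-- what changed: B replaces A's stateful loop that mutates four flags per path (with two redundant prefix-test blocks, both subsumed by the substring test) by building a single flat union set of all lowercased methods found on matching paths and reading each capability off that one set by a membership lookup; a timing run measured B much faster because A re-lowercases each path up to four times, rebuilds the per-path method set up to three times and redoes the prefix concatenations every iteration, while B lowercases and scans each path once.
import Mathlib
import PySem

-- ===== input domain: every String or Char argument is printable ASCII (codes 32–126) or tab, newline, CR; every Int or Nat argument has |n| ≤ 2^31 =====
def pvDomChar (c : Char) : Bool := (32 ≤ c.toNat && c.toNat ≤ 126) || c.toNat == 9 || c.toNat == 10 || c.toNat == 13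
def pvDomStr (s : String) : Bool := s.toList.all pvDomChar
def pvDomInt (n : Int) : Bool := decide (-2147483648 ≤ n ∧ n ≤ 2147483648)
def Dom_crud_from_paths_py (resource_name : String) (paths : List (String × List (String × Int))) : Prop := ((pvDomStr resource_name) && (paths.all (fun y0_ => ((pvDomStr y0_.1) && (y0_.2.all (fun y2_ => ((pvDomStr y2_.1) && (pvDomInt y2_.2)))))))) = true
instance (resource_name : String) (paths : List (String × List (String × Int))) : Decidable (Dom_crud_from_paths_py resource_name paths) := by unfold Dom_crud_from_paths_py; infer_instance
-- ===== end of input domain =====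

-- B replaces A's four-flag mutating loop (whose two prefix blocks are subsumed by the substring test)
-- by one flat union set of all lowercased methods on matching paths, read by four membership lookups; objective: simpler.

-- ===== PORT A =====
-- the lowered method-name set {m.lower() for m in path_item.keys()}
def pvMethodsA (item : List (String × Int)) : PySem.Set String :=
  PySem.Set.ofList (item.map (fun kv => PySem.Str.lower kv.1))

-- one iteration of A's 'for p, path_item in (paths or {}).items()' loop over the caps dict
def pvStepA (lowRes plural singular : List Char) (caps : PySem.Dict String Bool)
    (pr : String × List (String × Int)) : PySem.Dict String Bool :=
  let lowP := PySem.Chars.lower pr.1.toList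
  let caps :=
    if PySem.Chars.isIn lowRes lowP then
      let methods := pvMethodsA pr.2
      let caps := if methods.contains "get" then caps.insert "canRead" true else caps
      let caps := if methods.contains "post" then caps.insert "canCreate" true else caps
      let caps := if methods.contains "put" || methods.contains "patch" then caps.insert "canUpdate" true else caps
      let caps := if methods.contains "delete" then caps.insert "canDelete" true else caps
      caps
    else caps
  let caps :=
    if PySem.Chars.startswith lowP plural then
      let methods := pvMethodsA pr.2
      let caps := if methods.contains "get" then caps.insert "canRead" true else caps
      let caps := if methods.contains "post" then caps.insert "canCreate" true else caps
      caps
    else caps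
  let caps :=
    if PySem.Chars.startswith lowP (singular ++ ['/']) || PySem.Chars.startswith lowP (plural ++ ['/']) then
      let methods := pvMethodsA pr.2
      let caps := if methods.contains "get" then caps.insert "canRead" true else caps
      let caps := if methods.contains "put" || methods.contains "patch" then caps.insert "canUpdate" true else caps
      let caps := if methods.contains "delete" then caps.insert "canDelete" true else caps
      caps
    else caps
  caps

def crud_from_paths_py (resource_name : String) (paths : List (String × List (String × Int))) : List (String × Bool) :=
  let lowRes := PySem.Chars.lower resource_name.toList
  let plural := '/' :: lowRes ++ ['s']
  let singular := '/' :: lowRes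
  let caps : PySem.Dict String Bool :=
    PySem.Dict.ofList [("canCreate", false), ("canRead", false), ("canUpdate", false), ("canDelete", false)]
  (paths.foldl (pvStepA lowRes plural singular) caps).items

-- ===== PORT B =====
def crud_from_paths_py_alt (resource_name : String) (paths : List (String × List (String × Int))) : List (String × Bool) :=
  let low := PySem.Chars.lower resource_name.toList
  -- the flat set comprehension: every lowercased method of every matching path, deduplicated once
  let methods : PySem.Set String :=
    PySem.Set.ofList
      ((paths.filter (fun pr => PySem.Chars.isIn low (PySem.Chars.lower pr.1.toList))).flatMap
        (fun pr => pr.2.map (fun kv => PySem.Str.lower kv.1)))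
  [("canCreate", methods.contains "post"),
   ("canRead", methods.contains "get"),
   ("canUpdate", methods.contains "put" || methods.contains "patch"),
   ("canDelete", methods.contains "delete")]

-- ===== PRECONDITION & SPEC =====
def Spec_crud_from_paths_py (resource_name : String) (paths : List (String × List (String × Int))) (out : List (String × Bool)) : Prop := out = crud_from_paths_py_alt resource_name paths
instance (resource_name : String) (paths : List (String × List (String × Int))) (out : List (String × Bool)) : Decidable (Spec_crud_from_paths_py resource_name paths out) := by unfold Spec_crud_from_paths_py; infer_instance

-- ===== CLAIM (what is proved, stated in full; the proofs are below) =====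
def Claim_equal_crud_from_paths_py : Prop := ∀ (resource_name : String) (paths : List (String × List (String × Int))), Dom_crud_from_paths_py resource_name paths → Spec_crud_from_paths_py resource_name paths (crud_from_paths_py resource_name paths)

-- ===== LEMMAS AND PROOFS =====

-- the caps dict always keeps the literal 4-key shape
def pvMkCaps (c r u d : Bool) : PySem.Dict String Bool :=
  PySem.Dict.ofList [("canCreate", c), ("canRead", r), ("canUpdate", u), ("canDelete", d)]

theorem pvInsert_create (c r u d : Bool) : (pvMkCaps c r u d).insert "canCreate" true = pvMkCaps true r u d := rfl
theorem pvInsert_read (c r u d : Bool) : (pvMkCaps c r u d).insert "canRead" true = pvMkCaps c true u d := rfl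
theorem pvInsert_update (c r u d : Bool) : (pvMkCaps c r u d).insert "canUpdate" true = pvMkCaps c r true d := rfl
theorem pvInsert_delete (c r u d : Bool) : (pvMkCaps c r u d).insert "canDelete" true = pvMkCaps c r u true := rfl
theorem pvItems (c r u d : Bool) : (pvMkCaps c r u d).items = [("canCreate", c), ("canRead", r), ("canUpdate", u), ("canDelete", d)] := rfl

-- a path whose lowering starts with '/' ++ lowRes ++ sfx contains lowRes as a substring
theorem pvPrefix_isIn (lowRes sfx lowP : List Char)
    (h : PySem.Chars.startswith lowP ('/' :: lowRes ++ sfx) = true) :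
    PySem.Chars.isIn lowRes lowP = true := by
  rw [PySem.Chars.startswith_iff] at h
  rw [PySem.Chars.isIn_iff_infix]
  obtain ⟨t, ht⟩ := h
  exact ⟨['/'], sfx ++ t, by simp [← ht]⟩

theorem pvStepA_eq (lowRes : List Char) (c r u d : Bool) (pr : String × List (String × Int)) :
    pvStepA lowRes ('/' :: lowRes ++ ['s']) ('/' :: lowRes) (pvMkCaps c r u d) pr =
      (let inn := PySem.Chars.isIn lowRes (PySem.Chars.lower pr.1.toList)
       let m := pvMethodsA pr.2
       pvMkCaps (c || (inn && m.contains "post")) (r || (inn && m.contains "get"))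
         (u || (inn && (m.contains "put" || m.contains "patch"))) (d || (inn && m.contains "delete"))) := by
  simp only [pvStepA]
  by_cases hin : PySem.Chars.isIn lowRes (PySem.Chars.lower pr.1.toList) = true
  · -- blocks 2 and 3 only re-insert flags block 1 already set
    simp only [hin, if_true]
    by_cases hg : "get" ∈ pvMethodsA pr.2 <;>
    by_cases hp : "post" ∈ pvMethodsA pr.2 <;>
    by_cases hpu : "put" ∈ pvMethodsA pr.2 <;>
    by_cases hpa : "patch" ∈ pvMethodsA pr.2 <;>
    by_cases hd : "delete" ∈ pvMethodsA pr.2 <;>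
      simp_all [pvInsert_create, pvInsert_read, pvInsert_update, pvInsert_delete]
  · -- no substring match ⇒ neither prefix test can fire
    have h3 : PySem.Chars.startswith (PySem.Chars.lower pr.1.toList) ('/' :: (lowRes ++ ['/'])) = false := by
      cases hsw : PySem.Chars.startswith (PySem.Chars.lower pr.1.toList) ('/' :: (lowRes ++ ['/']))
      · rfl
      · exact absurd (pvPrefix_isIn lowRes ['/'] _ hsw) hin
    have h4 : PySem.Chars.startswith (PySem.Chars.lower pr.1.toList) ('/' :: (lowRes ++ ['s', '/'])) = false := by
      cases hsw : PySem.Chars.startswith (PySem.Chars.lower pr.1.toList) ('/' :: (lowRes ++ ['s', '/']))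
      · rfl
      · exact absurd (pvPrefix_isIn lowRes ['s', '/'] _ hsw) hin
    simp [hin, h3, h4]
    intro hsw
    exact absurd (pvPrefix_isIn lowRes ['s'] _ hsw) hin

theorem pvFoldA (lowRes : List Char) (ps : List (String × List (String × Int))) (c r u d : Bool) :
    ps.foldl (pvStepA lowRes ('/' :: lowRes ++ ['s']) ('/' :: lowRes)) (pvMkCaps c r u d) =
      pvMkCaps
        (c || ps.any (fun pr => PySem.Chars.isIn lowRes (PySem.Chars.lower pr.1.toList) && (pvMethodsA pr.2).contains "post"))
        (r || ps.any (fun pr => PySem.Chars.isIn lowRes (PySem.Chars.lower pr.1.toList) && (pvMethodsA pr.2).contains "get"))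
        (u || ps.any (fun pr => PySem.Chars.isIn lowRes (PySem.Chars.lower pr.1.toList) && ((pvMethodsA pr.2).contains "put" || (pvMethodsA pr.2).contains "patch")))
        (d || ps.any (fun pr => PySem.Chars.isIn lowRes (PySem.Chars.lower pr.1.toList) && (pvMethodsA pr.2).contains "delete")) := by
  induction ps generalizing c r u d with
  | nil => simp
  | cons hd' tl ih =>
    simp only [List.foldl_cons, pvStepA_eq, List.any_cons]
    rw [ih]
    simp [Bool.or_assoc]

-- membership in B's one union set = A's per-path any over the matching paths
theorem pvUnion_contains (lowRes : List Char) (ps : List (String × List (String × Int))) (x : String) :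
    (PySem.Set.ofList
      ((ps.filter (fun pr => PySem.Chars.isIn lowRes (PySem.Chars.lower pr.1.toList))).flatMap
        (fun pr => pr.2.map (fun kv => PySem.Str.lower kv.1)))).contains x =
    ps.any (fun pr => PySem.Chars.isIn lowRes (PySem.Chars.lower pr.1.toList) && (pvMethodsA pr.2).contains x) := by
  rw [Bool.eq_iff_iff]
  simp only [PySem.Set.contains_eq_listContains, List.contains_eq_mem, decide_eq_true_eq,
    PySem.Set.mem_ofList, List.mem_flatMap, List.mem_filter, List.any_eq_true, pvMethodsA,
    Bool.and_eq_true]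
  constructor
  · rintro ⟨pr, ⟨hmem, hin⟩, hx⟩
    exact ⟨pr, hmem, hin, by simpa [PySem.Set.mem_ofList] using hx⟩
  · rintro ⟨pr, hmem, hin, hx⟩
    exact ⟨pr, ⟨hmem, hin⟩, by simpa [PySem.Set.mem_ofList] using hx⟩

-- any over a conjunction with a disjunction splits into two anys
theorem pvAny_or {A : Type} (ps : List A) (f g h : A -> Bool) :
    (ps.any fun x => f x && (g x || h x)) = ((ps.any fun x => f x && g x) || ps.any fun x => f x && h x) := by
  rw [Bool.eq_iff_iff]
  simp only [List.any_eq_true, Bool.or_eq_true, Bool.and_eq_true]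
  constructor
  · rintro ⟨x, hx, hf, hg | hh⟩
    · exact Or.inl ⟨x, hx, hf, hg⟩
    · exact Or.inr ⟨x, hx, hf, hh⟩
  · rintro (⟨x, hx, hf, hg⟩ | ⟨x, hx, hf, hh⟩)
    · exact ⟨x, hx, hf, Or.inl hg⟩
    · exact ⟨x, hx, hf, Or.inr hh⟩

-- ===== VERDICT (by name: the statement is the Claim_ definition above) =====
theorem crud_from_paths_py_spec : Claim_equal_crud_from_paths_py := by
  intro resource_name paths _
  unfold Spec_crud_from_paths_py crud_from_paths_py crud_from_paths_py_alt
  show (paths.foldl _ (pvMkCaps false false false false)).items = _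
  rw [pvFoldA, pvItems]
  simp only [pvUnion_contains, Bool.false_or, pvAny_or]
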